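-- pv_equiv track=rewrite | github.com/Th3Tr00p3r/PrivacyPolicy | ppa/utils.py | combine_with_separators
-- ===== SOURCE A (Python) =====
-- from itertools import combinations, permutations
--
-- def combine_with_separators(words, separators, min_length=4, min_words: int = 1):
--     """
--     Combine words with separators, allowing for omitted words while ensuring at least one word appears.
--
--     Parameters
--     ----------
--     words : list[str]
--         List of words to combine.
--     separators : list[str]
--         List of separators for combination.
--
--     Returns
--     -------
--     list[str]
--         List of combined strings with separators and omitted words.
--     """
--
--     all_combinations = set()  # Using a set to ensure uniqueness
--
--     # Generate all permutations of word indices to allow for omitted words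
--     word_idxs = range(
--         min_words, len(words) + 1
--     )  # Start from 'min_words' to ensure at least 'min_words' words
--     word_combinations = [
--         comb for word_idx in word_idxs for comb in combinations(range(len(words)), word_idx)
--     ]
--
--     for word_comb in word_combinations:
--         for perm in permutations(word_comb):
--             selected_words = [words[idx] for idx in perm]
--
--             for sep in separators:
--                 # Combine selected words with the current separator
--                 combined = sep.join(selected_words)
--                 # enforce minimum length
--                 if len(combined) >= min_length:
--                     all_combinations.add(combined)
--
--     return list(all_combinations)
-- ===== SOURCE B (Python) =====
-- def combine_with_separators(words, separators, min_length=4, min_words: int = 1):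
--     """Fused recursive enumeration: pick word sublists and their orderings directly
--     from the words list (no itertools, no materialised combinations-of-indices list),
--     accumulating the joined strings in a set."""
--     seen = set()
--
--     def picks(ws, r):
--         # sublists of ws of length r, preserving order
--         if r == 0:
--             yield []
--             return
--         if len(ws) < r:
--             return
--         head, rest = ws[0], ws[1:]
--         for tail in picks(rest, r - 1):
--             yield [head] + tail
--         yield from picks(rest, r)
--
--     def selections(items):
--         # (element, remaining-in-order) pairs, one per position
--         if not items:
--             return
--         head, rest = items[0], items[1:]
--         yield head, rest
--         for h, r in selections(rest):
--             yield h, [head] + r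
--
--     def perms(items):
--         if not items:
--             yield []
--             return
--         for head, rest in selections(items):
--             for tail in perms(rest):
--                 yield [head] + tail
--
--     for r in range(min_words, len(words) + 1):
--         for chosen in picks(words, r):
--             for perm in perms(chosen):
--                 for sep in separators:
--                     combined = sep.join(perm)
--                     if len(combined) >= min_length:
--                         seen.add(combined)
--     return list(seen)
-- ===== Notes on version B (the rewrite author's own statement) =====
-- stated objective: alternative
-- what changed: Replaces the combinations-of-indices-then-permutations itertools pipeline (with a materialised word_combinations list and index indirection) by a fused recursive generator enumeration that picks ordered word sublists and their orderings directly from the words list, with no itertools and no intermediate list.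
-- outside the precondition, e.g. on combine_with_separators(['ab'], ['-'], 0, -1): A raises ValueError, B raises IndexError
import Mathlib
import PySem

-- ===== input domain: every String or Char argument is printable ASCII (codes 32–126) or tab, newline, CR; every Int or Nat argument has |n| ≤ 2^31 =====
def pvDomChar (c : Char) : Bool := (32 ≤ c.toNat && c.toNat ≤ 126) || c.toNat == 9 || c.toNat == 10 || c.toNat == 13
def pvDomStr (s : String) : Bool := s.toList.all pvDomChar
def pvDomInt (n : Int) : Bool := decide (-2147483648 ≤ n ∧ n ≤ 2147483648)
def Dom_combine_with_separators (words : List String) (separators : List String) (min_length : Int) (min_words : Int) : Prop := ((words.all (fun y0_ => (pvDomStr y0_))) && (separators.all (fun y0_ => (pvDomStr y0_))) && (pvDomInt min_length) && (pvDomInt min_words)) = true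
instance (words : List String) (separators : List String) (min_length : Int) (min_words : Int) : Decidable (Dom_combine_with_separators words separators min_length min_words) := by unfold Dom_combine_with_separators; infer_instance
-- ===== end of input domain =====

-- B replaces the combinations-then-permute pipeline over index tuples by a fused recursive
-- enumeration of word sublists and their orderings over the words themselves (objective: alternative).

-- ===== PORT A =====

-- itertools.combinations over a list, in itertools' lexicographic order
def pvCombs {α : Type} : Nat → List α → List (List α)
  | 0, _ => [[]]
  | _ + 1, [] => []
  | k + 1, x :: xs => ((pvCombs k xs).map (fun c => x :: c)) ++ pvCombs (k + 1) xs

-- (element, remaining-in-order) selections; shared shape of itertools.permutations' order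
def pvSel {α : Type} : List α → List (α × List α)
  | [] => []
  | x :: xs => (x, xs) :: (pvSel xs).map (fun p => (p.1, x :: p.2))

-- needed by pvPerms' termination
theorem pvSel_snd_length {α : Type} : ∀ (l : List α) (p : α × List α), p ∈ pvSel l → p.2.length + 1 = l.length := by
  intro l
  induction l with
  | nil => intro p hp; simp [pvSel] at hp
  | cons x xs ih =>
    intro p hp
    simp only [pvSel, List.mem_cons, List.mem_map] at hp
    rcases hp with h | ⟨q, hq, rfl⟩
    · subst h; simp
    · have := ih q hq; simp at this ⊢; omega

-- itertools.permutations, in itertools' order (each element first, then permutations of the rest)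
def pvPerms {α : Type} (l : List α) : List (List α) :=
  match l with
  | [] => [[]]
  | x :: xs => (pvSel (x :: xs)).attach.flatMap (fun p => (pvPerms p.1.2).map (fun t => p.1.1 :: t))
termination_by l.length
decreasing_by
  have := pvSel_snd_length (x :: xs) p.1 p.2
  simp at this ⊢
  omega

-- literal port of A: build word_combinations, then permute, join, length-filter into a set.
-- (r < 0 would raise ValueError in Python; such inputs are outside Pre_.)
def combine_with_separators (words : List String) (separators : List String) (min_length : Int) (min_words : Int) : List String :=
  let n := PySem.List.len words
  let word_idxs := PySem.List.pyRange min_words (n + 1) 1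
  let word_combinations := word_idxs.flatMap (fun r => pvCombs r.toNat (PySem.List.pyRange 0 n 1))
  word_combinations.foldl
    (fun s word_comb =>
      (pvPerms word_comb).foldl
        (fun s perm =>
          let selected_words := perm.map (fun idx => PySem.List.pyGetD words idx "")
          separators.foldl
            (fun s sep =>
              let combined := PySem.Str.join sep selected_words
              if min_length ≤ PySem.Str.len combined then PySem.Set.add s combined else s) s) s)
    (PySem.Set.empty : PySem.Set String)

-- ===== PORT B =====

-- Source B's picks: ordered sublists of ws of length r, with the early length guard
def pvPicks : List String → Nat → List (List String)
  | _, 0 => [[]]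
  | [], _ + 1 => []  -- the 'len(ws) < r' guard fires
  | w :: rest, k + 1 =>
    if rest.length + 1 < k + 1 then []
    else ((pvPicks rest k).map (fun t => w :: t)) ++ pvPicks rest (k + 1)

-- fused loops over picks/perms of the words themselves, accumulating joins in a set
def combine_with_separators_alt (words : List String) (separators : List String) (min_length : Int) (min_words : Int) : List String :=
  (PySem.List.pyRange min_words (PySem.List.len words + 1) 1).foldl
    (fun seen r =>
      (pvPicks words r.toNat).foldl
        (fun seen chosen =>
          (pvPerms chosen).foldl
            (fun seen perm =>
              separators.foldl
                (fun seen sep =>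
                  let combined := PySem.Str.join sep perm
                  if min_length ≤ PySem.Str.len combined then PySem.Set.add seen combined else seen) seen) seen) seen)
    (PySem.Set.empty : PySem.Set String)

-- ===== PRECONDITION & SPEC =====
-- Pre_ excludes only min_words < 0, where Python A raises ValueError (itertools.combinations with a negative r).
def Pre_combine_with_separators (words : List String) (separators : List String) (min_length : Int) (min_words : Int) : Prop := 0 ≤ min_words
instance (words : List String) (separators : List String) (min_length : Int) (min_words : Int) : Decidable (Pre_combine_with_separators words separators min_length min_words) := by unfold Pre_combine_with_separators; infer_instance
def pvWitness_combine_with_separators : List String × List String × Int × Int := (["ab", "c"], ["-"], 1, 1)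

def Spec_combine_with_separators (words : List String) (separators : List String) (min_length : Int) (min_words : Int) (out : List String) : Prop := out = combine_with_separators_alt words separators min_length min_words
instance (words : List String) (separators : List String) (min_length : Int) (min_words : Int) (out : List String) : Decidable (Spec_combine_with_separators words separators min_length min_words out) := by unfold Spec_combine_with_separators; infer_instance

-- ===== CLAIM (what is proved, stated in full; the proofs are below) =====
def Claim_equal_combine_with_separators : Prop := ∀ (words : List String) (separators : List String) (min_length : Int) (min_words : Int), Dom_combine_with_separators words separators min_length min_words → Pre_combine_with_separators words separators min_length min_words → Spec_combine_with_separators words separators min_length min_words (combine_with_separators words separators min_length min_words)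

-- ===== LEMMAS AND PROOFS =====

theorem pv_flatMap_attach {α β : Type} (l : List α) (f : α → List β) :
    l.attach.flatMap (fun p => f p.1) = l.flatMap f := by
  conv_rhs => rw [← List.attach_map_subtype_val l]
  rw [List.flatMap_map]

theorem pvPerms_cons {α : Type} (x : α) (xs : List α) :
    pvPerms (x :: xs) = (pvSel (x :: xs)).flatMap (fun p => (pvPerms p.2).map (fun t => p.1 :: t)) := by
  rw [pvPerms]
  exact pv_flatMap_attach (pvSel (x :: xs)) (fun q => (pvPerms q.2).map (fun t => q.1 :: t))

theorem pvSel_map {α β : Type} (f : α → β) (l : List α) :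
    pvSel (l.map f) = (pvSel l).map (fun p => (f p.1, p.2.map f)) := by
  induction l with
  | nil => simp [pvSel]
  | cons x xs ih => simp [pvSel, ih, List.map_map, Function.comp]

theorem pvPermsMap {α β : Type} (f : α → β) (l : List α) :
    pvPerms (l.map f) = (pvPerms l).map (List.map f) := by
  have H : ∀ (n : Nat) (l : List α), l.length ≤ n → pvPerms (l.map f) = (pvPerms l).map (List.map f) := by
    intro n
    induction n with
    | zero =>
      intro l h
      have : l = [] := List.eq_nil_of_length_eq_zero (Nat.le_zero.mp h)
      subst this; simp [pvPerms]
    | succ n ih =>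
      intro l h
      cases l with
      | nil => simp [pvPerms]
      | cons x xs =>
        have hc : pvPerms (List.map f (x :: xs)) =
            (pvSel (List.map f (x :: xs))).flatMap (fun p => (pvPerms p.2).map (fun t => p.1 :: t)) := by
          rw [List.map_cons, pvPerms_cons, ← List.map_cons]
        rw [hc, pvSel_map, pvPerms_cons, List.flatMap_map, List.map_flatMap]
        rw [List.flatMap_def, List.flatMap_def]
        apply congrArg List.flatten
        apply List.map_congr_left
        intro p hp
        have hlen := pvSel_snd_length (x :: xs) p hp
        have hle : p.2.length ≤ n := by simp at hlen h; omega
        simp only [ih p.2 hle, List.map_map]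
        apply List.map_congr_left
        intro t _
        simp
  exact H l.length l le_rfl

theorem pvCombsMap {α β : Type} (f : α → β) : ∀ (k : Nat) (l : List α),
    pvCombs k (l.map f) = (pvCombs k l).map (List.map f) := by
  intro k l
  induction l generalizing k with
  | nil => cases k <;> simp [pvCombs]
  | cons x xs ih =>
    cases k with
    | zero => simp [pvCombs]
    | succ k => simp [pvCombs, ih, List.map_map, Function.comp]

theorem pvCombs_nil_of_lt {α : Type} : ∀ (l : List α) (k : Nat), l.length < k → pvCombs k l = [] := by
  intro l
  induction l with
  | nil => intro k hk; cases k with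
    | zero => simp at hk
    | succ k => simp [pvCombs]
  | cons x xs ih =>
    intro k hk
    cases k with
    | zero => simp at hk
    | succ k =>
      simp only [pvCombs]
      rw [ih k (by simp at hk; omega), ih (k + 1) (by simp at hk ⊢; omega)]
      simp

theorem pvPicks_eq_pvCombs : ∀ (ws : List String) (k : Nat), pvPicks ws k = pvCombs k ws := by
  intro ws
  induction ws with
  | nil => intro k; cases k <;> simp [pvPicks, pvCombs]
  | cons w rest ih =>
    intro k
    cases k with
    | zero => simp [pvPicks, pvCombs]
    | succ k =>
      simp only [pvPicks]
      split
      · next hlt =>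
        have h1 : pvCombs k rest = [] := pvCombs_nil_of_lt rest k (by omega)
        have h2 : pvCombs (k + 1) rest = [] := pvCombs_nil_of_lt rest (k + 1) (by omega)
        simp [pvCombs, h1, h2]
      · simp [pvCombs, ih]

-- picks over the words themselves = A's index combinations, pushed through indexing
theorem pvPicks_norm (words : List String) (k : Nat) :
    pvPicks words k =
      (pvCombs k (PySem.List.pyRange 0 (PySem.List.len words) 1)).map
        (List.map (fun idx => PySem.List.pyGetD words idx "")) := by
  rw [← pvCombsMap, PySem.List.map_pyGetD_pyRange_zero, pvPicks_eq_pvCombs]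

theorem pv_foldl_flatMap {α β γ : Type} (l : List α) (g : α → List β) (f : γ → β → γ) (init : γ) :
    (l.flatMap g).foldl f init = l.foldl (fun a x => (g x).foldl f a) init := by
  induction l generalizing init with
  | nil => rfl
  | cons x xs ih => simp [List.flatMap_cons, List.foldl_append, ih]

theorem pv_main (words separators : List String) (min_length min_words : Int) :
    combine_with_separators words separators min_length min_words =
      combine_with_separators_alt words separators min_length min_words := by
  unfold combine_with_separators combine_with_separators_alt
  simp only [pvPicks_norm, List.foldl_map, pvPermsMap, pv_foldl_flatMap]

-- ===== VERDICT (by name: the statement is the Claim_ definition above) =====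
theorem combine_with_separators_spec : Claim_equal_combine_with_separators := by
  intro words separators min_length min_words _hdom _hpre
  unfold Spec_combine_with_separators
  exact pv_main words separators min_length min_words
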